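-- pv_equiv track=rewrite | github.com/lasse-cs/AdventOfCode | AOC2024/day22/monkey_market.py | calculate_banana_sequences_for_secret
-- ===== SOURCE A (Python) =====
-- from typing import TypeAlias
--
-- def mix(secret: int, value: int) -> int:
--     return secret ^ value
--
-- def prune(secret: int) -> int:
--     return secret % 16777216
--
-- def multiply_mix_prune(secret: int, value: int) -> int:
--     intermediate: int = secret * value
--     intermediate = mix(secret, intermediate)
--     return prune(intermediate)
--
-- def divide_mix_prune(secret: int, value: int) -> int:
--     intermediate: int = secret // value
--     intermediate = mix(secret, intermediate)
--     return prune(intermediate)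
--
-- def generate_next_secret(secret: int) -> int:
--     secret = multiply_mix_prune(secret, 64)
--     secret = divide_mix_prune(secret, 32)
--     secret = multiply_mix_prune(secret, 2048)
--     return secret
--
-- PriceSequence: TypeAlias = tuple[int, int, int, int]
--
-- def calculate_banana_sequences_for_secret(
--     secret: int, n: int
-- ) -> dict[PriceSequence, int]:
--     prices: list[int] = []
--     for _ in range(n):
--         prices.append(secret % 10)
--         secret = generate_next_secret(secret)
--
--     sequences: dict[PriceSequence, int] = {}
--
--     for i in range(4, len(prices)):
--         sequence: PriceSequence = (
--             prices[i - 3] - prices[i - 4],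
--             prices[i - 2] - prices[i - 3],
--             prices[i - 1] - prices[i - 2],
--             prices[i] - prices[i - 1],
--         )
--         if sequence in sequences:
--             continue
--         sequences[sequence] = prices[i]
--     return sequences
-- ===== SOURCE B (Python) =====
-- def _next_secret(secret):
--     secret = (secret ^ (secret * 64)) % 16777216
--     secret = (secret ^ (secret // 32)) % 16777216
--     secret = (secret ^ (secret * 2048)) % 16777216
--     return secret
--
-- def calculate_banana_sequences_for_secret(secret, n):
--     sequences = {}
--     prev = None
--     d1 = d2 = d3 = d4 = None
--     for _ in range(n):
--         price = secret % 10
--         if prev is not None: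
--             d1, d2, d3, d4 = d2, d3, d4, price - prev
--             if d1 is not None:
--                 key = (d1, d2, d3, d4)
--                 if key not in sequences:
--                     sequences[key] = price
--         prev = price
--         secret = _next_secret(secret)
--     return sequences
-- ===== Notes on version B (the rewrite author's own statement) =====
-- stated objective: alternative
-- what changed: B fuses A's two passes (build the full prices list, then re-scan it with a 4-wide index window) into a single streaming pass that keeps only the previous price and the last four price changes in four plain variables, inserting first occurrences on the fly without materialising the prices list.
import Mathlib
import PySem

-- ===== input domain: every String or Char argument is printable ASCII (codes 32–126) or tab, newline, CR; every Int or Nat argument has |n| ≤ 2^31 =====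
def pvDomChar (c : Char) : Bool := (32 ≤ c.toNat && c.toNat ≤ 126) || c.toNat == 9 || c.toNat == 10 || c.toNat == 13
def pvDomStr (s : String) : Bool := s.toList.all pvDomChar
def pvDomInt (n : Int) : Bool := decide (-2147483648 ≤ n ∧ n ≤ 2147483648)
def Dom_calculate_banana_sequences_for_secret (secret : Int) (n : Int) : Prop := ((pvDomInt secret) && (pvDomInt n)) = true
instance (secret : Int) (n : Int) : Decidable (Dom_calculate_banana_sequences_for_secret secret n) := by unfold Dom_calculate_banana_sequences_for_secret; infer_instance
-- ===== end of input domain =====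

-- B fuses A's two passes into one streaming pass with a rolling window of the last 4 price
-- changes (no full prices list); objective: alternative decomposition, same asymptotic cost.

-- ===== PORT A =====
def mix (secret value : Int) : Int := PySem.Int.bxor secret value

def prune (secret : Int) : Int := PySem.Int.mod secret 16777216

def multiply_mix_prune (secret value : Int) : Int :=
  let intermediate : Int := secret * value
  prune (mix secret intermediate)

def divide_mix_prune (secret value : Int) : Int :=
  let intermediate : Int := PySem.Int.floordiv secret value
  prune (mix secret intermediate)

def generate_next_secret (secret : Int) : Int :=
  multiply_mix_prune (divide_mix_prune (multiply_mix_prune secret 64) 32) 2048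

def calculate_banana_sequences_for_secret (secret : Int) (n : Int) : List (Int × Int × Int × Int × Int) :=
  let st := (PySem.List.pyRange 0 n 1).foldl
    (fun (st : List Int × Int) _ => (st.1 ++ [PySem.Int.mod st.2 10], generate_next_secret st.2))
    ([], secret)
  let prices : List Int := st.1
  let sequences : PySem.Dict (Int × Int × Int × Int) Int :=
    (PySem.List.pyRange 4 (prices.length : Int) 1).foldl
      (fun (d : PySem.Dict (Int × Int × Int × Int) Int) i =>
        let sequence : Int × Int × Int × Int :=
          (PySem.List.pyGetD prices (i - 3) 0 - PySem.List.pyGetD prices (i - 4) 0,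
           PySem.List.pyGetD prices (i - 2) 0 - PySem.List.pyGetD prices (i - 3) 0,
           PySem.List.pyGetD prices (i - 1) 0 - PySem.List.pyGetD prices (i - 2) 0,
           PySem.List.pyGetD prices i 0 - PySem.List.pyGetD prices (i - 1) 0)
        if d.contains sequence then d
        else d.insert sequence (PySem.List.pyGetD prices i 0))
      PySem.Dict.empty
  sequences.items.map (fun p => (p.1.1, p.1.2.1, p.1.2.2.1, p.1.2.2.2, p.2))

-- ===== PORT B =====
def next_secret_alt (secret : Int) : Int :=
  let s1 := PySem.Int.mod (PySem.Int.bxor secret (secret * 64)) 16777216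
  let s2 := PySem.Int.mod (PySem.Int.bxor s1 (PySem.Int.floordiv s1 32)) 16777216
  PySem.Int.mod (PySem.Int.bxor s2 (s2 * 2048)) 16777216

def loopB : Nat → Int → Option Int → Option Int → Option Int → Option Int → Option Int →
    PySem.Dict (Int × Int × Int × Int) Int → PySem.Dict (Int × Int × Int × Int) Int
  | 0, _, _, _, _, _, _, d => d
  | m + 1, secret, prev, d1, d2, d3, d4, d =>
    let price := PySem.Int.mod secret 10
    match prev with
    | none => loopB m (next_secret_alt secret) (some price) d1 d2 d3 d4 d
    | some pr =>
      -- d1, d2, d3, d4 = d2, d3, d4, price - prev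
      let e1 := d2
      let e2 := d3
      let e3 := d4
      let e4 := some (price - pr)
      -- 'if d1 is not None: key = (d1, d2, d3, d4) …' (all four are ints once d1 is)
      let d' := match e1, e2, e3, e4 with
        | some a, some b, some c, some e =>
            if d.contains (a, b, c, e) then d else d.insert (a, b, c, e) price
        | _, _, _, _ => d
      loopB m (next_secret_alt secret) (some price) e1 e2 e3 e4 d'

def calculate_banana_sequences_for_secret_alt (secret : Int) (n : Int) : List (Int × Int × Int × Int × Int) :=
  (loopB n.toNat secret none none none none none PySem.Dict.empty).items.map
    (fun p => (p.1.1, p.1.2.1, p.1.2.2.1, p.1.2.2.2, p.2))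

-- ===== PRECONDITION & SPEC =====
def Spec_calculate_banana_sequences_for_secret (secret : Int) (n : Int) (out : List (Int × Int × Int × Int × Int)) : Prop := out = calculate_banana_sequences_for_secret_alt secret n
instance (secret : Int) (n : Int) (out : List (Int × Int × Int × Int × Int)) : Decidable (Spec_calculate_banana_sequences_for_secret secret n out) := by unfold Spec_calculate_banana_sequences_for_secret; infer_instance

-- ===== CLAIM (what is proved, stated in full; the proofs are below) =====
def Claim_equal_calculate_banana_sequences_for_secret : Prop := ∀ (secret : Int) (n : Int), Dom_calculate_banana_sequences_for_secret secret n → Spec_calculate_banana_sequences_for_secret secret n (calculate_banana_sequences_for_secret secret n)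

-- ===== LEMMAS AND PROOFS =====

-- iterated secret, prices and changes
def itSec (s : Int) : Nat → Int
  | 0 => s
  | k + 1 => generate_next_secret (itSec s k)

def priceAt (s : Int) (k : Nat) : Int := PySem.Int.mod (itSec s k) 10

def chg (s : Int) (j : Nat) : Int := priceAt s j - priceAt s (j - 1)

def insStep (s : Int) (d : PySem.Dict (Int × Int × Int × Int) Int) (i : Nat) :
    PySem.Dict (Int × Int × Int × Int) Int :=
  let key := (chg s (i - 3), chg s (i - 2), chg s (i - 1), chg s i)
  if d.contains key then d else d.insert key (priceAt s i)

-- dictionary after the first k prices have been processed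
def DD (s : Int) : Nat → PySem.Dict (Int × Int × Int × Int) Int
  | 0 => PySem.Dict.empty
  | k + 1 => if 4 ≤ k then insStep s (DD s (k)) k else DD s k

theorem itSec_succ' (s : Int) (k : Nat) : itSec s (k + 1) = generate_next_secret (itSec s k) := rfl

-- A's first loop
theorem foldl_const {α β : Type} (f : β → β) (l : List α) (init : β) :
    l.foldl (fun st _ => f st) init = f^[l.length] init := by
  induction l generalizing init with
  | nil => rfl
  | cons x xs ih => simp [List.foldl_cons, ih, Function.iterate_succ_apply]

def stepP (st : List Int × Int) : List Int × Int :=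
  (st.1 ++ [PySem.Int.mod st.2 10], generate_next_secret st.2)

theorem prices_spec (s : Int) (m : Nat) :
    stepP^[m] ([], s) = ((List.range m).map (priceAt s), itSec s m) := by
  induction m with
  | zero => rfl
  | succ k ih =>
      rw [Function.iterate_succ_apply', ih]
      simp [stepP, List.range_succ, priceAt, itSec_succ']

theorem pyGetD_prices (s : Int) (N : Nat) (j : Nat) (hj : j < N) :
    PySem.List.pyGetD ((List.range N).map (priceAt s)) (j : Int) 0 = priceAt s j := by
  rw [PySem.List.pyGetD_eq_getElem]
  · simp
  · exact Int.natCast_nonneg j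
  · simpa using hj

theorem DD_small (s : Int) (k : Nat) (hk : k ≤ 4) : DD s k = PySem.Dict.empty := by
  interval_cases k <;> simp [DD]

theorem A_fold (s : Int) (N : Nat) (k : Nat) (hk : k ≤ N) :
    (PySem.List.pyRange 4 (k : Int) 1).foldl
      (fun (d : PySem.Dict (Int × Int × Int × Int) Int) i =>
        let prices := (List.range N).map (priceAt s)
        let sequence : Int × Int × Int × Int :=
          (PySem.List.pyGetD prices (i - 3) 0 - PySem.List.pyGetD prices (i - 4) 0,
           PySem.List.pyGetD prices (i - 2) 0 - PySem.List.pyGetD prices (i - 3) 0,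
           PySem.List.pyGetD prices (i - 1) 0 - PySem.List.pyGetD prices (i - 2) 0,
           PySem.List.pyGetD prices i 0 - PySem.List.pyGetD prices (i - 1) 0)
        if d.contains sequence then d
        else d.insert sequence (PySem.List.pyGetD prices i 0))
      PySem.Dict.empty = DD s k := by
  induction k with
  | zero =>
      rw [PySem.List.pyRange_one_eq_nil (by norm_num)]
      rfl
  | succ k ih =>
      by_cases h4 : 4 ≤ k
      · have hcast : ((k + 1 : Nat) : Int) = (k : Int) + 1 := by push_cast; ring
        rw [hcast, PySem.List.pyRange_one_succ_right (by exact_mod_cast h4),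
          List.foldl_append, ih (by omega)]
        have e3 : (k : Int) - 3 = ((k - 3 : Nat) : Int) := by omega
        have e4 : (k : Int) - 4 = ((k - 4 : Nat) : Int) := by omega
        have e2 : (k : Int) - 2 = ((k - 2 : Nat) : Int) := by omega
        have e1 : (k : Int) - 1 = ((k - 1 : Nat) : Int) := by omega
        simp only [List.foldl_cons, List.foldl_nil, e1, e2, e3, e4]
        rw [pyGetD_prices s N _ (by omega), pyGetD_prices s N _ (by omega),
          pyGetD_prices s N _ (by omega), pyGetD_prices s N _ (by omega),
          pyGetD_prices s N _ (by omega)]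
        have hc3 : priceAt s (k - 3) - priceAt s (k - 4) = chg s (k - 3) := by
          unfold chg; congr 1
        have hc2 : priceAt s (k - 2) - priceAt s (k - 3) = chg s (k - 2) := by
          unfold chg; congr 1
        have hc1 : priceAt s (k - 1) - priceAt s (k - 2) = chg s (k - 1) := by
          unfold chg; congr 1
        have hc0 : priceAt s k - priceAt s (k - 1) = chg s k := by
          unfold chg; congr 1
        rw [hc3, hc2, hc1, hc0]
        simp [DD, h4, insStep]
      · rw [PySem.List.pyRange_one_eq_nil (by exact_mod_cast by omega : ((k + 1 : Nat) : Int) ≤ 4)]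
        simp only [List.foldl_nil]
        rw [DD_small s (k + 1) (by omega)]

theorem B_inv (s : Int) (m : Nat) : ∀ (i : Nat), 1 ≤ i →
    loopB m (itSec s i) (some (priceAt s (i - 1)))
      (if 5 ≤ i then some (chg s (i - 4)) else none)
      (if 4 ≤ i then some (chg s (i - 3)) else none)
      (if 3 ≤ i then some (chg s (i - 2)) else none)
      (if 2 ≤ i then some (chg s (i - 1)) else none)
      (DD s i) = DD s (i + m) := by
  induction m with
  | zero => intro i _; rfl
  | succ m ih =>
      intro i hi
      have h := ih (i + 1) (by omega)
      simp only [Nat.add_sub_cancel] at h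
      have e1 : (if 5 ≤ i + 1 then some (chg s (i + 1 - 4)) else none) =
          (if 4 ≤ i then some (chg s (i - 3)) else none) := by
        by_cases hc : 4 ≤ i
        · rw [if_pos (by omega), if_pos hc, show i + 1 - 4 = i - 3 from by omega]
        · rw [if_neg (by omega), if_neg hc]
      have e2 : (if 4 ≤ i + 1 then some (chg s (i + 1 - 3)) else none) =
          (if 3 ≤ i then some (chg s (i - 2)) else none) := by
        by_cases hc : 3 ≤ i
        · rw [if_pos (by omega), if_pos hc, show i + 1 - 3 = i - 2 from by omega]
        · rw [if_neg (by omega), if_neg hc]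
      have e3 : (if 3 ≤ i + 1 then some (chg s (i + 1 - 2)) else none) =
          (if 2 ≤ i then some (chg s (i - 1)) else none) := by
        by_cases hc : 2 ≤ i
        · rw [if_pos (by omega), if_pos hc, show i + 1 - 2 = i - 1 from by omega]
        · rw [if_neg (by omega), if_neg hc]
      have e4 : (if 2 ≤ i + 1 then some (chg s i) else none) = some (chg s i) := by
        rw [if_pos (by omega)]
      rw [e1, e2, e3, e4, show i + 1 + m = i + (m + 1) from by omega] at h
      by_cases h4 : 4 ≤ i
      · rw [show DD s (i + 1) = insStep s (DD s i) i from by rw [DD, if_pos h4]] at h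
        rw [if_pos h4, if_pos (show 3 ≤ i from by omega), if_pos (show 2 ≤ i from by omega)] at h ⊢
        exact h
      · rw [show DD s (i + 1) = DD s i from by rw [DD, if_neg h4]] at h
        rw [if_neg h4] at h ⊢
        exact h

theorem B_total (s : Int) (N : Nat) :
    loopB N s none none none none none PySem.Dict.empty = DD s N := by
  cases N with
  | zero => rfl
  | succ m =>
      have h2 : loopB m (generate_next_secret s) (some (PySem.Int.mod s 10)) none none none none
          PySem.Dict.empty = DD s (m + 1) := by
        have := B_inv s m 1 (le_refl 1)
        simpa [itSec, DD, priceAt, itSec_succ', Nat.add_comm] using this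
      exact h2

-- ===== VERDICT (by name: the statement is the Claim_ definition above) =====
theorem calculate_banana_sequences_for_secret_spec : Claim_equal_calculate_banana_sequences_for_secret := by
  intro secret n _
  unfold Spec_calculate_banana_sequences_for_secret
  unfold calculate_banana_sequences_for_secret calculate_banana_sequences_for_secret_alt
  have h1 : (PySem.List.pyRange 0 n 1).foldl
      (fun (st : List Int × Int) _ => (st.1 ++ [PySem.Int.mod st.2 10], generate_next_secret st.2))
      ([], secret) = ((List.range n.toNat).map (priceAt secret), itSec secret n.toNat) := by
    rw [show (fun (st : List Int × Int) _ => (st.1 ++ [PySem.Int.mod st.2 10], generate_next_secret st.2)) =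
      (fun (st : List Int × Int) (_ : Int) => stepP st) from rfl]
    rw [foldl_const stepP, PySem.List.length_pyRange_one]
    rw [show (n - 0).toNat = n.toNat from by omega]
    exact prices_spec secret n.toNat
  rw [h1]
  simp only
  rw [List.length_map, List.length_range]
  rw [A_fold secret n.toNat n.toNat (le_refl _), B_total secret n.toNat]
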